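-- pv_equiv track=rewrite | github.com/zhanghuiyong/pm_review | ref_explore.py | parse_boolean_query
-- ===== SOURCE A (Python) =====
-- import itertools
--
-- def parse_boolean_query(query):
--     """
--     Parse boolean queries and return all sub-query combinations
--     Input example:
--       ("precision medicine" OR "digital health") AND ("interpretable machine learning" OR "explainable artificial intelligence")
--     Output:
--       ['"precision medicine" "interpretable machine learning"',
--        '"precision medicine" "explainable artificial intelligence"',
--        '"digital health" "interpretable machine learning"',
--        '"digital health" "explainable artificial intelligence"']
--     """
--     # Split by AND blocks
--     blocks = [b.strip(" ()") for b in query.split("AND")]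
--     option_lists = []
--     for b in blocks:
--         parts = [p.strip(" ()\"") for p in b.split("OR")]
--         option_lists.append(parts)
--
--     # Cartesian product combination + preserve double quotes
--     combos = list(itertools.product(*option_lists))
--     return [" ".join([f"\"{term}\"" for term in c]) for c in combos]
-- ===== SOURCE B (Python) =====
-- def parse_boolean_query(query):
--     def expand(blocks):
--         head, *rest = blocks
--         terms = ['"%s"' % p.strip(' ()"') for p in head.strip(" ()").split("OR")]
--         if not rest:
--             return terms
--         return [t + " " + s for t in terms for s in expand(rest)]
--     return expand(query.split("AND"))
-- ===== Notes on version B (the rewrite author's own statement) =====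
-- stated objective: alternative
-- what changed: Replaces the staged pipeline (collect all option lists, itertools.product into tuples, then join) with a recursive descent over the AND blocks that builds the final quoted strings directly: each level quotes its own block's OR options and prefixes them to the recursively expanded suffix strings, so no tuple combinations are ever materialized.
import Mathlib
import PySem

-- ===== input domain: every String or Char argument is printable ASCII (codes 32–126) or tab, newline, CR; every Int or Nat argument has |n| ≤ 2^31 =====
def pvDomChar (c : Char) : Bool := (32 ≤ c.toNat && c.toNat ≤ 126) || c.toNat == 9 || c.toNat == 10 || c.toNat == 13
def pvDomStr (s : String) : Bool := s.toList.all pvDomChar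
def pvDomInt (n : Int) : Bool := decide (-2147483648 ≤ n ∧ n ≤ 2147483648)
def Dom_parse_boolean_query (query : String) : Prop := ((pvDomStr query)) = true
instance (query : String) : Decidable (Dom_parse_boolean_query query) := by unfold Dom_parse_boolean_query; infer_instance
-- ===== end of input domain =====

-- B replaces the collect-lists / itertools.product / join pipeline with a recursive descent over the
-- AND blocks that builds the final quoted strings directly; same output, no speed claim.

-- ===== PORT A =====
-- itertools.product(*option_lists): leftmost list varies slowest
def pvProduct : List (List String) → List (List String)
  | [] => [[]]
  | l :: ls => l.flatMap (fun x => (pvProduct ls).map (fun r => x :: r))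

def parse_boolean_query (query : String) : List String :=
  let blocks := ((PySem.Str.split? query "AND").getD []).map (fun b => PySem.Str.stripChars b " ()")
  let option_lists := blocks.foldl (fun acc b =>
      acc ++ [((PySem.Str.split? b "OR").getD []).map (fun p => PySem.Str.stripChars p " ()\"")]) []
  let combos := pvProduct option_lists
  combos.map (fun c => PySem.Str.join " " (c.map (fun term => "\"" ++ term ++ "\"")))

-- ===== PORT B =====
-- terms of one AND block: its OR options, stripped and quoted
def pvTerms (b : String) : List String :=
  ((PySem.Str.split? (PySem.Str.stripChars b " ()") "OR").getD []).map
    (fun p => "\"" ++ PySem.Str.stripChars p " ()\"" ++ "\"")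

-- recursive descent: quote this block's options, prefix each to every expansion of the remaining blocks
def pvExpand : List String → List String
  | [] => []
  | [b] => pvTerms b
  | b :: rest => (pvTerms b).flatMap (fun t => (pvExpand rest).map (fun s => t ++ " " ++ s))

def parse_boolean_query_alt (query : String) : List String :=
  pvExpand ((PySem.Str.split? query "AND").getD [])

-- ===== PRECONDITION & SPEC =====
def Spec_parse_boolean_query (query : String) (out : List String) : Prop := out = parse_boolean_query_alt query
instance (query : String) (out : List String) : Decidable (Spec_parse_boolean_query query out) := by unfold Spec_parse_boolean_query; infer_instance

-- ===== CLAIM (what is proved, stated in full; the proofs are below) =====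
def Claim_equal_parse_boolean_query : Prop := ∀ (query : String), Dom_parse_boolean_query query → Spec_parse_boolean_query query (parse_boolean_query query)

-- ===== LEMMAS AND PROOFS =====

-- A's append-accumulator loop building option_lists is map
theorem pv_foldl_append (f : String → List String) (bs : List String) (acc : List (List String)) :
    bs.foldl (fun a b => a ++ [f b]) acc = acc ++ bs.map f := by
  induction bs generalizing acc with
  | nil => simp
  | cons b bs ih => simp [List.foldl_cons, ih]

-- Python's s.split(sep) for a nonempty sep never returns an empty list
theorem pv_splitOn_go_ne_nil (sep : List Char) (fuel : Nat) (l cur : List Char)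
    (acc : List (List Char)) : PySem.Chars.splitOn.go sep fuel l cur acc ≠ [] := by
  induction fuel generalizing l cur acc with
  | zero => simp [PySem.Chars.splitOn.go]
  | succ fuel ih =>
      cases l with
      | nil => simp [PySem.Chars.splitOn.go]
      | cons c rest =>
          rw [PySem.Chars.splitOn.go]
          split
          · exact ih _ _ _
          · exact ih _ _ _

theorem pv_split?_ne_nil (s sep : String) (h : sep.toList ≠ []) :
    (PySem.Str.split? s sep).getD [] ≠ [] := by
  simp only [PySem.Str.split?, PySem.Chars.split?, List.isEmpty_iff]
  rw [if_neg h]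
  simp only [Option.map_some, Option.getD_some, ne_eq, List.map_eq_nil_iff]
  exact pv_splitOn_go_ne_nil _ _ _ _ _

-- String equality via code points
theorem pv_str_ext (s t : String) (h : s.toList = t.toList) : s = t := by
  have := congrArg String.ofList h
  simpa using this

theorem pv_join_singleton (p : String) : PySem.Str.join " " [p] = p := by
  apply pv_str_ext
  simp [PySem.Str.toList_join, PySem.Chars.join_singleton]

theorem pv_join_cons_cons (p q : String) (rest : List String) :
    PySem.Str.join " " (p :: q :: rest) = p ++ " " ++ PySem.Str.join " " (q :: rest) := by
  apply pv_str_ext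
  simp [PySem.Str.toList_join, PySem.Chars.join_cons_cons]

theorem pv_product_singleton (l : List String) : pvProduct [l] = l.map (fun x => [x]) := by
  induction l with
  | nil => rfl
  | cons x xs ih =>
      simp only [pvProduct, List.map_cons, List.map_nil, List.flatMap_cons] at ih ⊢
      simp [ih]

-- the recursive descent computes exactly "product then join" over the per-block option lists
theorem pv_expand_eq (blocks : List String) (h : blocks ≠ []) :
    pvExpand blocks
      = (pvProduct (blocks.map (fun b =>
          ((PySem.Str.split? (PySem.Str.stripChars b " ()") "OR").getD []).map
            (fun p => PySem.Str.stripChars p " ()\"")))).map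
          (fun c => PySem.Str.join " " (c.map (fun term => "\"" ++ term ++ "\""))) := by
  induction blocks with
  | nil => exact absurd rfl h
  | cons b rest ih =>
      cases rest with
      | nil =>
          rw [show pvExpand [b] = pvTerms b from rfl, List.map_cons, List.map_nil,
            pv_product_singleton, List.map_map]
          simp [pvTerms, Function.comp_def, pv_join_singleton]
      | cons b2 rest' =>
          have hne : (b2 :: rest') ≠ [] := by simp
          simp only [pvExpand]
          rw [ih hne]
          simp only [List.map_cons, pvProduct, List.map_flatMap, List.map_map, pvTerms,
            List.flatMap_map, Function.comp_def]
          refine List.flatMap_congr (fun x _ => ?_)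
          refine List.flatMap_congr (fun a _ => ?_)
          refine List.map_congr_left (fun c _ => ?_)
          rw [pv_join_cons_cons]
  
-- ===== VERDICT (by name: the statement is the Claim_ definition above) =====
theorem parse_boolean_query_spec : Claim_equal_parse_boolean_query := by
  intro query _
  unfold Spec_parse_boolean_query parse_boolean_query parse_boolean_query_alt
  dsimp only
  rw [pv_foldl_append]
  rw [pv_expand_eq _ (pv_split?_ne_nil query "AND" (by decide))]
  simp [List.map_map, Function.comp_def]
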